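-- pv_equiv track=rewrite | github.com/dev-ankit-0067/ai-support-engg | ai_agents/ai_support_engginer.py | filter_log_lines
-- ===== SOURCE A (Python) =====
-- KEYWORDS = (
--     "ERROR", "Exception", "SparkException", "Caused by",
--     "OutOfMemoryError", "ExecutorLostFailure", "Container killed",
--     "TaskKilled", "ExitCode", "GC overhead", "FileNotFoundException",
--     "AnalysisException", "AccessDenied", "Permission denied", "Timeout"
-- )
--
-- def filter_log_lines(log_text: str, keep_context_lines: int = 1) -> str:
--     """
--     Keep only high-signal lines (+ a little context) to reduce prompt size.
--     """
--     lines = log_text.splitlines()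
--     keep = [False] * len(lines)
--
--     for i, line in enumerate(lines):
--         if any(k in line for k in KEYWORDS):
--             for j in range(max(0, i - keep_context_lines), min(len(lines), i + keep_context_lines + 1)):
--                 keep[j] = True
--
--     filtered = [lines[i] for i in range(len(lines)) if keep[i]]
--     return "\n".join(filtered) if filtered else log_text
-- ===== SOURCE B (Python) =====
-- KEYWORDS = (
--     "ERROR", "Exception", "SparkException", "Caused by",
--     "OutOfMemoryError", "ExecutorLostFailure", "Container killed",
--     "TaskKilled", "ExitCode", "GC overhead", "FileNotFoundException",
--     "AnalysisException", "AccessDenied", "Permission denied", "Timeout"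
-- )
--
-- def filter_log_lines(log_text: str, keep_context_lines: int = 1) -> str:
--     """
--     Keep only high-signal lines (+ a little context) to reduce prompt size.
--     Pull-style: each keyword match is computed once, and a line is kept iff
--     some line in its window matches (no mutable keep array).
--     """
--     lines = log_text.splitlines()
--     matched = [any(k in line for k in KEYWORDS) for line in lines]
--     filtered = [line for i, line in enumerate(lines)
--                 if any(matched[max(0, i - keep_context_lines):
--                                max(0, i + keep_context_lines + 1)])]
--     return "\n".join(filtered) if filtered else log_text
-- ===== Notes on version B (the rewrite author's own statement) =====
-- stated objective: alternative
-- what changed: A pushes each keyword match into a mutable keep[] boolean array by stamping its context window; B computes the per-line match flags once and keeps a line iff its clamped window slice of those flags contains a match (pull-style, no mutable array).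
import Mathlib
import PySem

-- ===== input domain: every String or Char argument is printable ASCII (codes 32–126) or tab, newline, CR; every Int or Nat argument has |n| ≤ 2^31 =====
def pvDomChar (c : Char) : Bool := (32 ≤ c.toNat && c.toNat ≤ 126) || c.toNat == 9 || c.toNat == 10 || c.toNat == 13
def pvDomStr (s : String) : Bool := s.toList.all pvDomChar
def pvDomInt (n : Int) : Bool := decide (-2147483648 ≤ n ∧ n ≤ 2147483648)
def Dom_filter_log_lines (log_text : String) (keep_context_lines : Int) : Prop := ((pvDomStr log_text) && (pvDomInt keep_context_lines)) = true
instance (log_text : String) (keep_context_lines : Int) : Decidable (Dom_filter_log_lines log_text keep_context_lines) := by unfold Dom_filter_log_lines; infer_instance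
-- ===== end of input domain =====

-- B replaces A's push-style mutable keep[] array (each match stamps its window) by a
-- pull-style pass: match flags are computed once and each line is kept iff its clamped
-- window slice of the flags contains a match; same return value, alternative decomposition.

def pvKeywords : List String :=
  ["ERROR", "Exception", "SparkException", "Caused by",
   "OutOfMemoryError", "ExecutorLostFailure", "Container killed",
   "TaskKilled", "ExitCode", "GC overhead", "FileNotFoundException",
   "AnalysisException", "AccessDenied", "Permission denied", "Timeout"]

-- ===== PORT A =====
def filter_log_lines (log_text : String) (keep_context_lines : Int) : String :=
  let lines := PySem.Str.splitlines log_text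
  let n := lines.length
  let keep := (PySem.List.enumerate lines).foldl
    (fun keep p =>
      if pvKeywords.any (fun k => PySem.Str.isIn k p.2) then
        (PySem.List.pyRange (max 0 (p.1 - keep_context_lines))
            (min (n : Int) (p.1 + keep_context_lines + 1))).foldl
          (fun kp j => kp.set j.toNat true) keep
      else keep)
    (List.replicate n false)
  let filtered := ((PySem.List.pyRange 0 (n : Int)).filter
      (fun i => PySem.List.pyGetD keep i false)).map
      (fun i => PySem.List.pyGetD lines i "")
  if filtered ≠ [] then PySem.Str.join "\n" filtered else log_text

-- ===== PORT B =====
def filter_log_lines_alt (log_text : String) (keep_context_lines : Int) : String :=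
  let lines := PySem.Str.splitlines log_text
  let matched := lines.map (fun line => pvKeywords.any (fun k => PySem.Str.isIn k line))
  let filtered := ((PySem.List.enumerate lines).filter
      (fun p => (PySem.List.slice matched (some (max 0 (p.1 - keep_context_lines)))
                  (some (max 0 (p.1 + keep_context_lines + 1)))).any id)).map (·.2)
  if filtered ≠ [] then PySem.Str.join "\n" filtered else log_text

-- ===== PRECONDITION & SPEC =====
def Spec_filter_log_lines (log_text : String) (keep_context_lines : Int) (out : String) : Prop := out = filter_log_lines_alt log_text keep_context_lines
instance (log_text : String) (keep_context_lines : Int) (out : String) : Decidable (Spec_filter_log_lines log_text keep_context_lines out) := by unfold Spec_filter_log_lines; infer_instance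

-- ===== CLAIM (what is proved, stated in full; the proofs are below) =====
def Claim_equal_filter_log_lines : Prop := ∀ (log_text : String) (keep_context_lines : Int), Dom_filter_log_lines log_text keep_context_lines → Spec_filter_log_lines log_text keep_context_lines (filter_log_lines log_text keep_context_lines)

-- ===== LEMMAS AND PROOFS =====

-- length is preserved by the inner stamping loop of A
lemma pv_stamp_len (a b : Int) (kp : List Bool) :
    ((PySem.List.pyRange a b).foldl (fun kp j => kp.set j.toNat true) kp).length = kp.length := by
  induction (PySem.List.pyRange a b) generalizing kp with
  | nil => rfl
  | cons x xs ih => simpa [List.foldl_cons] using ih (kp.set x.toNat true)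

-- the inner stamping loop sets exactly the window [a, b)
lemma pv_stamp (a b : Int) (ha : 0 ≤ a) (kp : List Bool) (hb : b ≤ (kp.length : Int)) (i : Nat) :
    ((PySem.List.pyRange a b).foldl (fun kp j => kp.set j.toNat true) kp).getD i false
      = (kp.getD i false || decide (a ≤ (i : Int) ∧ (i : Int) < b)) := by
  by_cases hab : b ≤ a
  · rw [PySem.List.pyRange_one_eq_nil hab]
    simp only [List.foldl_nil]
    have : ¬ (a ≤ (i : Int) ∧ (i : Int) < b) := by omega
    simp [this]
  · push Not at hab
    rw [PySem.List.pyRange_one_cons hab]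
    simp only [List.foldl_cons]
    have hlen : (kp.set a.toNat true).length = kp.length := by simp
    have hrec := pv_stamp (a + 1) b (by omega) (kp.set a.toNat true) (by omega) i
    rw [hrec]
    have haN : a.toNat < kp.length := by omega
    by_cases hia : i = a.toNat
    · have h1 : (kp.set a.toNat true).getD i false = true := by
        rw [List.getD_eq_getElem?_getD, List.getElem?_set]
        simp [hia, haN]
      have h2 : a ≤ (i : Int) ∧ (i : Int) < b := by omega
      rw [h1]
      simp [h2]
    · have h1 : (kp.set a.toNat true).getD i false = kp.getD i false := by
        rw [List.getD_eq_getElem?_getD, List.getElem?_set, List.getD_eq_getElem?_getD]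
        simp [Ne.symm hia]
      rw [h1]
      congr 1
      rw [decide_eq_decide]
      omega
termination_by (b - a).toNat
decreasing_by omega

-- A's whole outer loop: keep[i] holds iff some already-processed match stamps i
lemma pv_outer (c : Int) (n : Nat) (ps : List (Int × String)) (kp : List Bool) (hlen : kp.length = n) :
    (ps.foldl (fun keep p =>
        if pvKeywords.any (fun k => PySem.Str.isIn k p.2) then
          (PySem.List.pyRange (max 0 (p.1 - c)) (min (n : Int) (p.1 + c + 1))).foldl
            (fun kp j => kp.set j.toNat true) keep
        else keep) kp).length = n ∧
    ∀ i : Nat,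
      (ps.foldl (fun keep p =>
        if pvKeywords.any (fun k => PySem.Str.isIn k p.2) then
          (PySem.List.pyRange (max 0 (p.1 - c)) (min (n : Int) (p.1 + c + 1))).foldl
            (fun kp j => kp.set j.toNat true) keep
        else keep) kp).getD i false
      = (kp.getD i false ||
          ps.any (fun p => pvKeywords.any (fun k => PySem.Str.isIn k p.2) &&
            decide (max 0 (p.1 - c) ≤ (i : Int) ∧ (i : Int) < min (n : Int) (p.1 + c + 1)))) := by
  induction ps generalizing kp with
  | nil => simp [hlen]
  | cons p ps ih =>
    simp only [List.foldl_cons, List.any_cons]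
    by_cases hm : (pvKeywords.any fun k => PySem.Str.isIn k p.2) = true
    · rw [if_pos hm]
      have hlen' : ((PySem.List.pyRange (max 0 (p.1 - c)) (min (n : Int) (p.1 + c + 1))).foldl
          (fun kp j => kp.set j.toNat true) kp).length = n := by
        rw [pv_stamp_len]; exact hlen
      obtain ⟨hL, hG⟩ := ih _ hlen'
      refine ⟨hL, fun i => ?_⟩
      rw [hG i, pv_stamp _ _ (by omega) kp (by omega) i, hm]
      simp [Bool.or_assoc]
    · rw [if_neg hm]
      obtain ⟨hL, hG⟩ := ih kp hlen
      refine ⟨hL, fun i => ?_⟩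
      rw [hG i]
      simp only [Bool.not_eq_true] at hm
      rw [hm]
      simp

-- any over a take/drop window of flags, as an existential over absolute indices
lemma pv_any_take_drop (xs : List Bool) (a m : Nat) :
    ((xs.drop a).take m).any id = true ↔
      ∃ j : Nat, j < xs.length ∧ a ≤ j ∧ j < a + m ∧ xs.getD j false = true := by
  rw [List.any_eq_true]
  constructor
  · rintro ⟨x, hx, hid⟩
    obtain ⟨j, hj, heq⟩ := List.mem_iff_getElem.mp hx
    have hjlt : j < min m (xs.length - a) := by simpa using hj
    refine ⟨a + j, by omega, by omega, by omega, ?_⟩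
    have : ((xs.drop a).take m)[j] = xs[a + j]'(by omega) := by
      simp [List.getElem_take, List.getElem_drop]
    rw [this] at heq
    have hx' : x = true := by simpa using hid
    rw [List.getD_eq_getElem _ _ (by omega)]
    rw [heq, hx']
  · rintro ⟨j, hjn, haj, hjm, hget⟩
    refine ⟨true, ?_, rfl⟩
    rw [List.mem_iff_getElem]
    refine ⟨j - a, by simp; omega, ?_⟩
    have : ((xs.drop a).take m)[j - a]'(by simp; omega) = xs[a + (j - a)]'(by omega) := by
      simp [List.getElem_take, List.getElem_drop]
    rw [this]
    rw [List.getD_eq_getElem _ _ hjn] at hget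
    have : a + (j - a) = j := by omega
    simp_all
  
-- the two 'filtered' lists coincide
lemma pv_filtered_eq (lines : List String) (c : Int) :
    ((PySem.List.pyRange 0 ((lines.length : Int))).filter
        (fun i => PySem.List.pyGetD
          ((PySem.List.enumerate lines).foldl
            (fun keep p =>
              if pvKeywords.any (fun k => PySem.Str.isIn k p.2) then
                (PySem.List.pyRange (max 0 (p.1 - c))
                    (min ((lines.length : Int)) (p.1 + c + 1))).foldl
                  (fun kp j => kp.set j.toNat true) keep
              else keep)
            (List.replicate lines.length false)) i false)).map
      (fun i => PySem.List.pyGetD lines i "")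
    = ((PySem.List.enumerate lines).filter
        (fun p => (PySem.List.slice (lines.map (fun line => pvKeywords.any (fun k => PySem.Str.isIn k line)))
                    (some (max 0 (p.1 - c))) (some (max 0 (p.1 + c + 1)))).any id)).map (·.2) := by
  obtain ⟨hL, hG⟩ := pv_outer c lines.length (PySem.List.enumerate lines)
    (List.replicate lines.length false) (by simp)
  conv_rhs => rw [PySem.List.enumerate_eq_map_pyRange lines ""]
  rw [List.filter_map, List.map_map]
  rw [List.filter_congr (q :=
    ((fun p : Int × String =>
        (PySem.List.slice (lines.map (fun line => pvKeywords.any (fun k => PySem.Str.isIn k line)))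
          (some (max 0 (p.1 - c))) (some (max 0 (p.1 + c + 1)))).any id)
      ∘ (fun j => (j, PySem.List.pyGetD lines j "")))) ?_]
  · exact List.map_congr_left (fun a _ => rfl)
  · intro i hi
    rw [PySem.List.mem_pyRange_one] at hi
    have hii : ((i.toNat : Int)) = i := Int.toNat_of_nonneg hi.1
    rw [Bool.eq_iff_iff]
    -- A side: unfold the stamped keep array
    rw [PySem.List.pyGetD_of_nonneg _ _ hi.1, hG i.toNat,
      List.getD_replicate _ (by omega), Bool.false_or, List.any_eq_true]
    -- B side: unfold the window slice of the match flags
    simp only [Function.comp]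
    rw [PySem.List.slice_toNat _ (le_max_left 0 _) (le_max_left 0 _), pv_any_take_drop]
    simp only [List.length_map]
    constructor
    · rintro ⟨p, hp, hF⟩
      rw [PySem.List.mem_enumerate_iff] at hp
      obtain ⟨k, hk, rfl⟩ := hp
      rw [Bool.and_eq_true, decide_eq_true_eq] at hF
      obtain ⟨hmk, hw⟩ := hF
      refine ⟨k, hk, by omega, by omega, ?_⟩
      rw [List.getD_eq_getElem _ _ (by simpa using hk), List.getElem_map]
      exact hmk
    · rintro ⟨j, hj, hja, hjb, hget⟩
      refine ⟨((j : Int), lines[j]'hj), ?_, ?_⟩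
      · rw [PySem.List.mem_enumerate_iff]
        exact ⟨j, hj, by simp⟩
      · rw [List.getD_eq_getElem _ _ (by simpa using hj), List.getElem_map] at hget
        rw [Bool.and_eq_true, decide_eq_true_eq]
        exact ⟨hget, by omega⟩

-- ===== VERDICT (by name: the statement is the Claim_ definition above) =====
theorem filter_log_lines_spec : Claim_equal_filter_log_lines := by
  intro log_text c _
  show filter_log_lines log_text c = filter_log_lines_alt log_text c
  simp only [filter_log_lines, filter_log_lines_alt, pv_filtered_eq]
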